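-- pv_equiv track=rewrite | github.com/blancheta/04_recursivity | main.py | greedy_solver
-- ===== SOURCE A (Python) =====
-- def greedy_solver(max_budget, actions):
--
--     actions_bought = []
--     budget_spent = 0
--
--     sorted_actions = list(sorted(actions, key=lambda x: x[1], reverse=True))
--
--     for action in sorted_actions:
--         if budget_spent + action[1] > max_budget:
--             return budget_spent, actions_bought
--         budget_spent += action[1]
--         actions_bought.append(action)
-- ===== SOURCE B (Python) =====
-- def greedy_solver(max_budget, actions):
--     """Find the spend and purchases accumulated up to the first action that no
--     longer fits the budget (None when the scan finds no such action)."""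
--     plan = sorted(actions, key=lambda a: a[1], reverse=True)
--     prefix = [0]
--     for _, cost in plan:
--         prefix.append(prefix[-1] + cost)
--     for i, p in enumerate(prefix[1:]):
--         if p > max_budget:
--             return prefix[i], plan[:i]
-- ===== Notes on version B (the rewrite author's own statement) =====
-- stated objective: alternative
-- what changed: Replaces A's single scan with mutating budget/bought accumulators and early return by a prefix-sum table plus a search for the first cumulative sum exceeding the budget, slicing the sorted list at that cutoff.
import Mathlib
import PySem

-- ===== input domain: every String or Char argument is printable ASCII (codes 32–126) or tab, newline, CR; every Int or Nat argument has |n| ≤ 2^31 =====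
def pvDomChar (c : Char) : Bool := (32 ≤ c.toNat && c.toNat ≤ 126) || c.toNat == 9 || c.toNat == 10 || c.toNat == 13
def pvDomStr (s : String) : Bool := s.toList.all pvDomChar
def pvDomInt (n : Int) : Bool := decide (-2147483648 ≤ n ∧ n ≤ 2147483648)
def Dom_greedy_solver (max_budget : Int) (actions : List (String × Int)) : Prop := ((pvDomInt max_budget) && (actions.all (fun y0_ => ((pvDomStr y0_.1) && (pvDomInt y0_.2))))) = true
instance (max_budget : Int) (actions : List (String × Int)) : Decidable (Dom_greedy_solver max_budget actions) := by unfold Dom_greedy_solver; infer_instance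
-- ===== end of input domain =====

-- B replaces A's mutating scan with a prefix-sum table and a cutoff search (objective: alternative
-- decomposition, same cost).

-- ===== PORT A =====
-- the for-loop of A: state = (budget_spent, actions_bought); early return on exceeding the budget,
-- implicit `return None` when the loop falls through
def pvLoopA (max_budget : Int) : List (String × Int) → Int → List (String × Int) → Option (Int × (List (String × Int)))
  | [], _, _ => none
  | action :: rest, budget_spent, actions_bought =>
    if budget_spent + action.2 > max_budget then some (budget_spent, actions_bought)
    else pvLoopA max_budget rest (budget_spent + action.2) (actions_bought ++ [action])

def greedy_solver (max_budget : Int) (actions : List (String × Int)) : Option (Int × (List (String × Int))) :=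
  let sorted_actions := PySem.List.sorted actions (key := fun x => x.2) (reverse := true)
  pvLoopA max_budget sorted_actions 0 []

-- ===== PORT B =====
-- the prefix-building loop of Source B: running total s, emits the cumulative sums (prefix[1..])
def pvPrefixB (s : Int) : List (String × Int) → List Int
  | [] => []
  | a :: rest => (s + a.2) :: pvPrefixB (s + a.2) rest

def greedy_solver_alt (max_budget : Int) (actions : List (String × Int)) : Option (Int × (List (String × Int))) :=
  let plan := PySem.List.sorted actions (key := fun x => x.2) (reverse := true)
  let pre : List Int := 0 :: pvPrefixB 0 plan            -- pre[i] = cost of the first i actions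
  -- the scan over enumerate(prefix[1:]): first index i with pre[i+1] > max_budget, else fall through
  match (pre.tail).findIdx? (fun p => decide (p > max_budget)) with
  | none => none
  | some i => some (pre.getD i 0, plan.take i)           -- pre[i] in range (i < len pre); [:i], i ≥ 0 = take

-- ===== PRECONDITION & SPEC =====
def Spec_greedy_solver (max_budget : Int) (actions : List (String × Int)) (out : Option (Int × (List (String × Int)))) : Prop := out = greedy_solver_alt max_budget actions
instance (max_budget : Int) (actions : List (String × Int)) (out : Option (Int × (List (String × Int)))) : Decidable (Spec_greedy_solver max_budget actions out) := by unfold Spec_greedy_solver; infer_instance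

-- ===== CLAIM (what is proved, stated in full; the proofs are below) =====
def Claim_equal_greedy_solver : Prop := ∀ (max_budget : Int) (actions : List (String × Int)), Dom_greedy_solver max_budget actions → Spec_greedy_solver max_budget actions (greedy_solver max_budget actions)

-- ===== LEMMAS AND PROOFS =====

-- A's loop with accumulators (spent, bought) equals the prefix-table cutoff computation shifted by spent / bought
theorem pvLoopA_eq (max_budget : Int) (l : List (String × Int)) :
    ∀ (spent : Int) (bought : List (String × Int)),
      pvLoopA max_budget l spent bought =
        match (pvPrefixB spent l).findIdx? (fun p => decide (p > max_budget)) with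
        | none => none
        | some cut => some ((spent :: pvPrefixB spent l).getD cut 0, bought ++ l.take cut) := by
  induction l with
  | nil => intro spent bought; simp [pvLoopA, pvPrefixB]
  | cons a rest ih =>
    intro spent bought
    by_cases h : spent + a.2 > max_budget
    · simp [pvLoopA, pvPrefixB, List.findIdx?_cons, h]
    · simp only [pvLoopA, pvPrefixB, h, List.findIdx?_cons, decide_eq_true_eq, if_false]
      rw [ih (spent + a.2) (bought ++ [a])]
      cases hf : (pvPrefixB (spent + a.2) rest).findIdx? (fun p => decide (p > max_budget)) with
      | none => simp
      | some cut => simp [List.take_succ_cons, List.getD]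

-- ===== VERDICT (by name: the statement is the Claim_ definition above) =====
theorem greedy_solver_spec : Claim_equal_greedy_solver := by
  intro max_budget actions _
  unfold Spec_greedy_solver greedy_solver greedy_solver_alt
  simp only [List.tail_cons]
  rw [pvLoopA_eq]
  cases hf : (pvPrefixB 0 (PySem.List.sorted actions (key := fun x => x.2) (reverse := true))).findIdx?
      (fun p => decide (p > max_budget)) <;> simp
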